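-- pv_equiv track=rewrite | github.com/sasen-git/vhh-designer | active/utilities/csv2msa_antpack_v5.py | analyze_tags_in_dataset
-- ===== SOURCE A (Python) =====
-- KNOWN_TAGS = {
--     "MSKIK": {"name": "MSKIK", "position": "N-term"},
--     "YPYDVPDYAYPYDVPDYAYPYDVPDYA": {"name": "3xHA", "position": "both"},
--     "WSHPQFEK": {"name": "Strep-tag", "position": "C-term"},
--     "EPEA": {"name": "C-tag", "position": "C-term"},
--     "HHHHHH": {"name": "6xHis-tag", "position": "both"},
--     "HHHHHHHH": {"name": "8xHis-tag", "position": "both"},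
-- }
--
-- def detect_tags_in_sequence(seq):
--     """Detect all known tags in a sequence."""
--     found_tags = {}
--     seq_upper = seq.upper()
--
--     for tag_seq, tag_info in KNOWN_TAGS.items():
--         positions = []
--         tag_name = tag_info["name"]
--
--         start = 0
--         while True:
--             idx = seq_upper.find(tag_seq, start)
--             if idx == -1:
--                 break
--
--             at_nterm = (idx < 20)
--             at_cterm = (idx > len(seq) - len(tag_seq) - 20)
--
--             if tag_info["position"] == "N-term" and at_nterm:
--                 positions.append(("N-term", idx, idx + len(tag_seq)))
--             elif tag_info["position"] == "C-term" and at_cterm: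
--                 positions.append(("C-term", idx, idx + len(tag_seq)))
--             elif tag_info["position"] == "both":
--                 if at_nterm:
--                     positions.append(("N-term", idx, idx + len(tag_seq)))
--                 elif at_cterm:
--                     positions.append(("C-term", idx, idx + len(tag_seq)))
--
--             start = idx + 1
--
--         if positions:
--             found_tags[tag_name] = positions
--
--     return found_tags
--
-- def analyze_tags_in_dataset(rows):
--     """Analyze all sequences for tags."""
--     tag_analysis = {}
--
--     for is_lead, rid, seq in rows:
--         found = detect_tags_in_sequence(seq)
--         for tag_name, positions in found.items():
--             if tag_name not in tag_analysis:
--                 tag_analysis[tag_name] = []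
--             tag_analysis[tag_name].append((rid, positions))
--
--     return tag_analysis
-- ===== SOURCE B (Python) =====
-- KNOWN_TAGS = {
--     "MSKIK": {"name": "MSKIK", "position": "N-term"},
--     "YPYDVPDYAYPYDVPDYAYPYDVPDYA": {"name": "3xHA", "position": "both"},
--     "WSHPQFEK": {"name": "Strep-tag", "position": "C-term"},
--     "EPEA": {"name": "C-tag", "position": "C-term"},
--     "HHHHHH": {"name": "6xHis-tag", "position": "both"},
--     "HHHHHHHH": {"name": "8xHis-tag", "position": "both"},
-- }
--
-- def _scan(s, tag, label, lo, hi):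
--     """Overlapping matches of tag in s at offsets lo..hi-1, labelled."""
--     hits = []
--     for i in range(lo, hi):
--         if s[i:i + len(tag)] == tag:
--             hits.append((label, i, i + len(tag)))
--     return hits
--
-- def analyze_tags_in_dataset(rows):
--     """Analyze all sequences for tags, probing only the terminal windows."""
--     tag_analysis = {}
--     for is_lead, rid, seq in rows:
--         s = seq.upper()
--         L = len(seq)
--         for tag_seq, info in KNOWN_TAGS.items():
--             t = len(tag_seq)
--             n_hi = min(20, L - t + 1)          # exclusive end of the N-terminal window
--             c_lo = max(0, L - t - 19)          # inclusive start of the C-terminal window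
--             pos = info["position"]
--             if pos == "N-term":
--                 hits = _scan(s, tag_seq, "N-term", 0, n_hi)
--             elif pos == "C-term":
--                 hits = _scan(s, tag_seq, "C-term", c_lo, L - t + 1)
--             else:  # "both": the N-terminal window wins, then the disjoint C-terminal rest
--                 hits = _scan(s, tag_seq, "N-term", 0, n_hi) + \
--                        _scan(s, tag_seq, "C-term", max(c_lo, n_hi), L - t + 1)
--             if hits:
--                 tag_analysis.setdefault(info["name"], []).append((rid, hits))
--     return tag_analysis
-- ===== Notes on version B (the rewrite author's own statement) =====
-- stated objective: alternative
-- what changed: Instead of repeatedly calling str.find over the whole sequence and filtering hits by position, B slice-compares each tag only at the candidate offsets inside the N-terminal window [0,20) and the C-terminal window (L-len(tag)-20, L-len(tag)], appending N-window hits first for 'both' tags so precedence and order match exactly.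
import Mathlib
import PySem

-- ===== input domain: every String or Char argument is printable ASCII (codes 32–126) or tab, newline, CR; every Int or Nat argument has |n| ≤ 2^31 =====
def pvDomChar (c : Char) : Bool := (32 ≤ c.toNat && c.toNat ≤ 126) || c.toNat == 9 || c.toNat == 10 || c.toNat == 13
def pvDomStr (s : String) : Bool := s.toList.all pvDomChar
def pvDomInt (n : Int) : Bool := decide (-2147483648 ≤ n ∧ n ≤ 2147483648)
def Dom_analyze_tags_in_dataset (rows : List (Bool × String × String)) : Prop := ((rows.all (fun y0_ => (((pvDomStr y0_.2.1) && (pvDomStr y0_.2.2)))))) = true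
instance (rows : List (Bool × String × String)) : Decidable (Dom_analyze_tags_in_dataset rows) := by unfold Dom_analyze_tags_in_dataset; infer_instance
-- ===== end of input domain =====

-- B detects each tag by slice-comparing only the terminal candidate windows (≤ 20
-- offsets each) instead of A's repeated str.find over the whole sequence; same result.

-- the module constant KNOWN_TAGS, as (tag_seq, name, position) in insertion order
def pvKnownTags : List (String × String × String) :=
  [("MSKIK", "MSKIK", "N-term"),
   ("YPYDVPDYAYPYDVPDYAYPYDVPDYA", "3xHA", "both"),
   ("WSHPQFEK", "Strep-tag", "C-term"),
   ("EPEA", "C-tag", "C-term"),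
   ("HHHHHH", "6xHis-tag", "both"),
   ("HHHHHHHH", "8xHis-tag", "both")]

-- ===== PORT A =====

theorem pvFindFrom_past (s sub : List Char) (k : Nat) (h : s.length < k) :
    PySem.Chars.findFrom s sub (k : Int) none = -1 := by
  have hk : ¬((k : Int) < 0) := by omega
  simp [PySem.Chars.findFrom, hk]
  intro h1
  omega

def pvTagLoopA (su tag : List Char) (L : Int) (pos : String)
    (start : Nat) (acc : List (String × Int × Int)) : List (String × Int × Int) :=
  let idx := PySem.Chars.findFrom su tag (start : Int) none
  if hidx : idx = -1 then acc
  else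
    let t : Int := (tag.length : Int)
    let at_nterm : Bool := decide (idx < 20)
    let at_cterm : Bool := decide (idx > L - t - 20)
    let acc' :=
      if pos == "N-term" && at_nterm then acc ++ [("N-term", idx, idx + t)]
      else if pos == "C-term" && at_cterm then acc ++ [("C-term", idx, idx + t)]
      else if pos == "both" then
        if at_nterm then acc ++ [("N-term", idx, idx + t)]
        else if at_cterm then acc ++ [("C-term", idx, idx + t)]
        else acc
      else acc
    pvTagLoopA su tag L pos (idx.toNat + 1) acc'
termination_by su.length + 1 - start
decreasing_by
  have hle : start ≤ su.length := by
    by_contra hgt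
    exact hidx (pvFindFrom_past su tag start (by omega))
  have hspec := PySem.Chars.findFrom_natCast_spec su tag start hle hidx
  omega

def pvDetectA (seq : String) : PySem.Dict String (List (String × Int × Int)) :=
  let su := PySem.Chars.upper seq.toList
  pvKnownTags.foldl (fun found tg =>
      let positions := pvTagLoopA su tg.1.toList ((seq.toList.length : Nat) : Int) tg.2.2 0 []
      if positions == [] then found else found.insert tg.2.1 positions)
    PySem.Dict.empty

def analyze_tags_in_dataset (rows : List (Bool × String × String)) :
    List (String × List (String × (List (String × Int × Int)))) :=
  (rows.foldl (fun ta row =>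
      (pvDetectA row.2.2).items.foldl
        (fun ta p => ta.modify p.1 [] (· ++ [(row.2.1, p.2)])) ta)
    PySem.Dict.empty).items

-- ===== PORT B =====

-- Source B's _scan: overlapping matches of tag in s over the index window [lo, hi)
def pvScanB (s tag : List Char) (label : String) (lo hi : Int) : List (String × Int × Int) :=
  (PySem.List.pyRange lo hi 1).foldl (fun acc i =>
      if PySem.Chars.slice s (some i) (some (i + (tag.length : Int))) == tag
      then acc ++ [(label, i, i + (tag.length : Int))] else acc) []

-- the per-row body of Source B's analyze_tags_in_dataset
def pvRowB (ta : PySem.Dict String (List (String × (List (String × Int × Int)))))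
    (row : Bool × String × String) :
    PySem.Dict String (List (String × (List (String × Int × Int)))) :=
  let s := PySem.Chars.upper row.2.2.toList
  let L : Int := (row.2.2.toList.length : Int)
  pvKnownTags.foldl (fun ta tg =>
      let t : Int := (tg.1.toList.length : Int)
      let nHi := min 20 (L - t + 1)
      let cLo := max 0 (L - t - 19)
      let hits :=
        if tg.2.2 == "N-term" then pvScanB s tg.1.toList "N-term" 0 nHi
        else if tg.2.2 == "C-term" then pvScanB s tg.1.toList "C-term" cLo (L - t + 1)
        else pvScanB s tg.1.toList "N-term" 0 nHi ++
             pvScanB s tg.1.toList "C-term" (max cLo nHi) (L - t + 1)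
      if hits == [] then ta else ta.modify tg.2.1 [] (· ++ [(row.2.1, hits)])) ta

def analyze_tags_in_dataset_alt (rows : List (Bool × String × String)) :
    List (String × List (String × (List (String × Int × Int)))) :=
  (rows.foldl pvRowB PySem.Dict.empty).items

-- ===== PRECONDITION & SPEC =====
def Spec_analyze_tags_in_dataset (rows : List (Bool × String × String)) (out : List (String × List (String × (List (String × Int × Int))))) : Prop := out = analyze_tags_in_dataset_alt rows
instance (rows : List (Bool × String × String)) (out : List (String × List (String × (List (String × Int × Int))))) : Decidable (Spec_analyze_tags_in_dataset rows out) := by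
  unfold Spec_analyze_tags_in_dataset
  letI e1 : DecidableEq (String × List (String × Int × Int)) := inferInstance
  letI e2 : DecidableEq (List (String × List (String × Int × Int))) := @instDecidableEqList _ e1
  letI e3 : DecidableEq (String × List (String × List (String × Int × Int))) := @instDecidableEqProd _ _ _ e2
  letI e4 : DecidableEq (List (String × List (String × List (String × Int × Int)))) := @instDecidableEqList _ e3
  exact e4 out (analyze_tags_in_dataset_alt rows)

-- ===== CLAIM (what is proved, stated in full; the proofs are below) =====
def Claim_equal_analyze_tags_in_dataset : Prop := ∀ (rows : List (Bool × String × String)), Dom_analyze_tags_in_dataset rows → Spec_analyze_tags_in_dataset rows (analyze_tags_in_dataset rows)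

-- ===== LEMMAS AND PROOFS =====

def pvHandle (t L : Int) (pos : String) (i : Nat) : List (String × Int × Int) :=
  if pos == "N-term" && decide ((i:Int) < 20) then [("N-term", (i:Int), (i:Int) + t)]
  else if pos == "C-term" && decide ((i:Int) > L - t - 20) then [("C-term", (i:Int), (i:Int) + t)]
  else if pos == "both" then
    if decide ((i:Int) < 20) then [("N-term", (i:Int), (i:Int) + t)]
    else if decide ((i:Int) > L - t - 20) then [("C-term", (i:Int), (i:Int) + t)]
    else []
  else []

theorem pvLoopA_eq (su tag : List Char) (L : Int) (pos : String) :
    ∀ (start : Nat) (acc : List (String × Int × Int)),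
      pvTagLoopA su tag L pos start acc =
      acc ++ ((List.range' start (su.length + 1 - start)).filter
        (fun i => decide (tag <+: su.drop i))).flatMap (pvHandle (tag.length : Int) L pos) := by
  have key : ∀ (fuel start : Nat), su.length + 1 - start ≤ fuel → ∀ acc,
      pvTagLoopA su tag L pos start acc =
      acc ++ ((List.range' start (su.length + 1 - start)).filter
        (fun i => decide (tag <+: su.drop i))).flatMap (pvHandle (tag.length : Int) L pos) := by
    intro fuel
    induction fuel with
    | zero =>
      intro start hf acc
      -- su.length + 1 - start = 0, so start > su.length; findFrom = -1
      have hgt : su.length < start := by omega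
      rw [pvTagLoopA]
      rw [dif_pos (pvFindFrom_past su tag start hgt)]
      have : su.length + 1 - start = 0 := by omega
      simp [this]
    | succ fuel ih =>
      intro start hf acc
      rw [pvTagLoopA]
      by_cases hidx : PySem.Chars.findFrom su tag (start : Int) none = -1
      · rw [dif_pos hidx]
        by_cases hle : start ≤ su.length
        · have hninf := (PySem.Chars.findFrom_natCast_eq_neg_one_iff su tag start hle).mp hidx
          have hfil : ((List.range' start (su.length + 1 - start)).filter
              (fun i => decide (tag <+: su.drop i))) = [] := by
            apply List.filter_eq_nil_iff.mpr
            intro i hi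
            simp only [List.mem_range'] at hi
            simp only [decide_eq_true_eq]
            intro hpre
            apply hninf
            have hdd : su.drop i = (su.drop start).drop (i - start) := by
              rw [List.drop_drop]
              congr 1
              omega
            rw [hdd] at hpre
            exact hpre.isInfix.trans (List.drop_suffix _ _).isInfix
          rw [hfil]
          simp
        · have : su.length + 1 - start = 0 := by omega
          simp [this]
      · rw [dif_neg hidx]
        have hle : start ≤ su.length := by
          by_contra hgt
          exact hidx (pvFindFrom_past su tag start (by omega))
        obtain ⟨h1, h2, h3⟩ := PySem.Chars.findFrom_natCast_spec su tag start hle hidx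
        set idx := PySem.Chars.findFrom su tag (start : Int) none with hidxdef
        have hnn : 0 ≤ idx := le_trans (by omega) h1
        set j := idx.toNat with hjdef
        have hj : (j : Int) = idx := Int.toNat_of_nonneg hnn
        have hjlen : j ≤ su.length := by
          have hff := PySem.Chars.findFrom_natCast su tag start hle
          rw [← hidxdef] at hff
          have hfind := PySem.Chars.find_le_length (su.drop start) tag
          have hlen : ((su.drop start).length : Int) = (su.length : Int) - start := by
            simp [List.length_drop]
            omega
          by_cases hf1 : PySem.Chars.find (List.drop start su) tag = -1
          · rw [if_pos hf1] at hff; omega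
          · rw [if_neg hf1] at hff
            rw [hlen] at hfind
            omega
        have hstj : start ≤ j := by omega
        -- split the range
        have hsplit : List.range' start (su.length + 1 - start) =
            List.range' start (j - start) ++ (j :: List.range' (j + 1) (su.length - j)) := by
          have e1 : List.range' j (su.length - j + 1) = j :: List.range' (j + 1) (su.length - j) :=
            List.range'_succ
          calc List.range' start (su.length + 1 - start)
              = List.range' start ((j - start) + (su.length - j + 1)) := by congr 1; omega
            _ = List.range' start (j - start) ++ List.range' (start + 1 * (j - start)) (su.length - j + 1) := by rw [List.range'_append]
            _ = List.range' start (j - start) ++ (j :: List.range' (j + 1) (su.length - j)) := by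
                rw [show start + 1 * (j - start) = j by omega, e1]
        rw [hsplit, List.filter_append]
        have hfil1 : (List.range' start (j - start)).filter (fun i => decide (tag <+: su.drop i)) = [] := by
          apply List.filter_eq_nil_iff.mpr
          intro i hi
          simp only [List.mem_range'] at hi
          simp only [decide_eq_true_eq]
          exact h3 i (by omega) (by omega)
        rw [hfil1]
        have hch : decide (tag <+: su.drop j) = true := by simpa using h2
        have hrec := ih (j + 1) (by omega)
        have hlen2 : su.length + 1 - (j + 1) = su.length - j := by omega
        rw [hlen2] at hrec
        have hacc : (if pos == "N-term" && decide (idx < 20) then acc ++ [("N-term", idx, idx + (tag.length : Int))]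
            else if pos == "C-term" && decide (idx > L - (tag.length : Int) - 20) then acc ++ [("C-term", idx, idx + (tag.length : Int))]
            else if pos == "both" then
              if decide (idx < 20) then acc ++ [("N-term", idx, idx + (tag.length : Int))]
              else if decide (idx > L - (tag.length : Int) - 20) then acc ++ [("C-term", idx, idx + (tag.length : Int))]
              else acc
            else acc) = acc ++ pvHandle (tag.length : Int) L pos j := by
          rw [pvHandle, ← hj]
          split_ifs <;> simp
        simp only [List.nil_append, List.filter_cons, h2, decide_true, if_true, List.flatMap_cons, hacc, hrec, List.append_assoc]
  intro start acc
  exact key (su.length + 1 - start) start le_rfl acc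

-- ===== B side =====

theorem pvTake_beq (l tag : List Char) : (l.take tag.length == tag) = decide (tag <+: l) := by
  by_cases h : tag <+: l
  · simp [h, (List.prefix_iff_eq_take.mp h).symm]
  · simp [h]
    intro heq
    exact h (List.prefix_iff_eq_take.mpr heq.symm)

theorem pvScanB_eq (s tag : List Char) (label : String) (lo hi : Int) (hlo : 0 ≤ lo) :
    pvScanB s tag label lo hi =
    ((List.range' lo.toNat (hi - lo).toNat).filter (fun i => decide (tag <+: s.drop i))).map
      (fun i : Nat => (label, (i : Int), (i : Int) + (tag.length : Int))) := by
  rw [pvScanB, PySem.List.foldl_append_if]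
  rw [PySem.List.pyRange_one]
  have hmap : (List.range (hi - lo).toNat).map (fun k : Nat => lo + (k : Int)) =
      (List.range' lo.toNat (hi - lo).toNat).map (fun i : Nat => (i : Int)) := by
    rw [List.range'_eq_map_range, List.map_map]
    apply List.map_congr_left
    intro k hk
    simp
    omega
  rw [hmap, List.filter_map, List.map_map, List.nil_append]
  congr 1
  apply List.filter_congr
  intro i hi
  simp only [Function.comp]
  rw [PySem.Chars.slice_eq_listSlice, PySem.List.slice_natCast_add, pvTake_beq]

theorem pvBound (su tag : List Char) (htag : tag ≠ []) (i : Nat) (h : tag <+: su.drop i) :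
    i + tag.length ≤ su.length := by
  have hl := h.length_le
  simp only [List.length_drop] at hl
  have ht : 0 < tag.length := List.length_pos_of_ne_nil htag
  omega

theorem pvFlatMapIf {α β : Type} (l : List α) (q : α → Bool) (f : α → β) :
    l.flatMap (fun i => if q i then [f i] else []) = (l.filter q).map f := by
  induction l with
  | nil => simp
  | cons a t ih =>
    by_cases h : q a <;> simp [h, ih]

-- a filter over a window [s, s+n) equals a filter over [0, N) when p is false outside the window

theorem pvFilterWin (s n N : Nat) (p : Nat → Bool) (hN : s + n ≤ N)
    (h0 : ∀ i, i < s → p i = false) (h1 : ∀ i, s + n ≤ i → p i = false) :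
    (List.range' s n).filter p = (List.range N).filter p := by
  rw [List.range_eq_range']
  have hsplit : List.range' 0 N = List.range' 0 s ++ List.range' s n ++ List.range' (s + n) (N - (s + n)) := by
    calc List.range' 0 N = List.range' 0 (s + (n + (N - (s + n)))) := by congr 1; omega
      _ = List.range' 0 s ++ List.range' (0 + 1 * s) (n + (N - (s + n))) := by rw [List.range'_append]
      _ = List.range' 0 s ++ (List.range' s n ++ List.range' (s + 1 * n) (N - (s + n))) := by
            rw [show 0 + 1 * s = s by omega, List.range'_append]
      _ = List.range' 0 s ++ List.range' s n ++ List.range' (s + n) (N - (s + n)) := by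
            rw [show s + 1 * n = s + n by omega, List.append_assoc]
  rw [hsplit, List.filter_append, List.filter_append]
  have e0 : (List.range' 0 s).filter p = [] := by
    apply List.filter_eq_nil_iff.mpr
    intro i hi
    simp only [List.mem_range'] at hi
    exact ne_true_of_eq_false (h0 i (by omega))
  have e1 : (List.range' (s + n) (N - (s + n))).filter p = [] := by
    apply List.filter_eq_nil_iff.mpr
    intro i hi
    simp only [List.mem_range'] at hi
    exact ne_true_of_eq_false (h1 i (by omega))
  rw [e0, e1]
  simp

theorem pvHandle_N (t L : Int) (i : Nat) :
    pvHandle t L "N-term" i =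
    if decide ((i : Int) < 20) then [("N-term", (i : Int), (i : Int) + t)] else [] := by
  rw [pvHandle]
  by_cases h : ((i : Int) < 20) <;> simp [h]

theorem pvHandle_C (t L : Int) (i : Nat) :
    pvHandle t L "C-term" i =
    if decide ((i : Int) > L - t - 20) then [("C-term", (i : Int), (i : Int) + t)] else [] := by
  rw [pvHandle]
  by_cases h : ((i : Int) > L - t - 20) <;> simp [h]

theorem pvHandle_B (t L : Int) (i : Nat) :
    pvHandle t L "both" i =
    if decide ((i : Int) < 20) then [("N-term", (i : Int), (i : Int) + t)]
    else if decide ((i : Int) > L - t - 20) then [("C-term", (i : Int), (i : Int) + t)]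
    else [] := by
  rw [pvHandle]
  rfl

theorem pvTagN (su tag : List Char) (htag : tag ≠ []) :
    pvTagLoopA su tag (su.length : Int) "N-term" 0 [] =
    pvScanB su tag "N-term" 0 (min 20 ((su.length : Int) - (tag.length : Int) + 1)) := by
  rw [pvLoopA_eq, pvScanB_eq su tag "N-term" 0 _ (le_refl 0)]
  have hh : ∀ l : List Nat,
      l.flatMap (pvHandle (tag.length : Int) (su.length : Int) "N-term") =
      (l.filter (fun i : Nat => decide ((i : Int) < 20))).map
        (fun i : Nat => ("N-term", (i : Int), (i : Int) + (tag.length : Int))) := by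
    intro l
    rw [← pvFlatMapIf]
    exact List.flatMap_congr (fun i _ => pvHandle_N _ _ i)
  rw [hh, List.nil_append, List.filter_filter]
  congr 1
  have ht := List.length_pos_of_ne_nil htag
  have hcongr : (List.range' (Int.toNat 0) ((min 20 ((su.length : Int) - (tag.length : Int) + 1) - 0).toNat)).filter
        (fun i : Nat => decide (tag <+: su.drop i)) =
      (List.range' 0 ((min 20 ((su.length : Int) - (tag.length : Int) + 1)).toNat)).filter
        (fun a : Nat => decide ((a : Int) < 20) && decide (tag <+: su.drop a)) := by
    rw [show Int.toNat 0 = 0 from rfl,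
        show (min 20 ((su.length : Int) - (tag.length : Int) + 1) - 0) = min 20 ((su.length : Int) - (tag.length : Int) + 1) by ring]
    apply List.filter_congr
    intro i hi
    simp only [List.mem_range'] at hi
    have h20 : (i : Int) < 20 := by omega
    simp [h20]
  rw [hcongr, ← List.range_eq_range']
  refine (pvFilterWin 0 _ (su.length + 1) _ (by omega) (fun i hi => absurd hi (by omega)) ?_).symm
  intro i hi
  by_cases hP : tag <+: su.drop i
  · have hb := pvBound su tag htag i hP
    simp only [hP, decide_true, Bool.and_true, decide_eq_false_iff_not]
    omega
  · simp [hP]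

theorem pvTagC (su tag : List Char) (htag : tag ≠ []) :
    pvTagLoopA su tag (su.length : Int) "C-term" 0 [] =
    pvScanB su tag "C-term" (max 0 ((su.length : Int) - (tag.length : Int) - 19))
      ((su.length : Int) - (tag.length : Int) + 1) := by
  have ht := List.length_pos_of_ne_nil htag
  rw [pvLoopA_eq, pvScanB_eq su tag "C-term" _ _ (le_max_left _ _)]
  have hh : ∀ l : List Nat,
      l.flatMap (pvHandle (tag.length : Int) (su.length : Int) "C-term") =
      (l.filter (fun i : Nat => decide ((i : Int) > (su.length : Int) - (tag.length : Int) - 20))).map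
        (fun i : Nat => ("C-term", (i : Int), (i : Int) + (tag.length : Int))) := by
    intro l
    rw [← pvFlatMapIf]
    exact List.flatMap_congr (fun i _ => pvHandle_C _ _ i)
  rw [hh, List.nil_append, List.filter_filter]
  congr 1
  have hcongr : (List.range' (max 0 ((su.length : Int) - (tag.length : Int) - 19)).toNat
        (((su.length : Int) - (tag.length : Int) + 1 - max 0 ((su.length : Int) - (tag.length : Int) - 19)).toNat)).filter
        (fun i : Nat => decide (tag <+: su.drop i)) =
      (List.range' (max 0 ((su.length : Int) - (tag.length : Int) - 19)).toNat
        (((su.length : Int) - (tag.length : Int) + 1 - max 0 ((su.length : Int) - (tag.length : Int) - 19)).toNat)).filter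
        (fun a : Nat => decide ((a : Int) > (su.length : Int) - (tag.length : Int) - 20) && decide (tag <+: su.drop a)) := by
    apply List.filter_congr
    intro i hi
    simp only [List.mem_range'] at hi
    have hct : (i : Int) > (su.length : Int) - (tag.length : Int) - 20 := by omega
    simp [hct]
  rw [hcongr, ← List.range_eq_range']
  refine (pvFilterWin _ _ (su.length + 1) _ (by omega) ?_ ?_).symm
  · intro i hi
    have hlt : ¬((i : Int) > (su.length : Int) - (tag.length : Int) - 20) := by omega
    simp [hlt]
  · intro i hi
    by_cases hP : tag <+: su.drop i
    · exfalso
      have hb := pvBound su tag htag i hP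
      omega
    · simp [hP]

theorem pvFlatMapSing {α β : Type} (l : List α) (f : α → β) :
    l.flatMap (fun i => [f i]) = l.map f := by
  induction l with
  | nil => rfl
  | cons a t ih => simp [ih]

theorem pvFilterTrunc (k m : Nat) (p : Nat → Bool) (hkm : k ≤ m)
    (h : ∀ i, k ≤ i → i < m → p i = false) :
    (List.range' 0 m).filter p = (List.range' 0 k).filter p := by
  have hsplit : List.range' 0 m = List.range' 0 k ++ List.range' k (m - k) := by
    calc List.range' 0 m = List.range' 0 (k + (m - k)) := by congr 1; omega
      _ = List.range' 0 k ++ List.range' (0 + 1 * k) (m - k) := by rw [List.range'_append]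
      _ = List.range' 0 k ++ List.range' k (m - k) := by rw [show 0 + 1 * k = k by omega]
  rw [hsplit, List.filter_append]
  have e1 : (List.range' k (m - k)).filter p = [] := by
    apply List.filter_eq_nil_iff.mpr
    intro i hi
    simp only [List.mem_range'] at hi
    exact ne_true_of_eq_false (h i (by omega) (by omega))
  rw [e1, List.append_nil]

theorem pvTagB (su tag : List Char) (htag : tag ≠ []) :
    pvTagLoopA su tag (su.length : Int) "both" 0 [] =
    pvScanB su tag "N-term" 0 (min 20 ((su.length : Int) - (tag.length : Int) + 1)) ++
    pvScanB su tag "C-term"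
      (max (max 0 ((su.length : Int) - (tag.length : Int) - 19)) (min 20 ((su.length : Int) - (tag.length : Int) + 1)))
      ((su.length : Int) - (tag.length : Int) + 1) := by
  have ht := List.length_pos_of_ne_nil htag
  set L : Int := (su.length : Int) with hL
  set tI : Int := (tag.length : Int) with htI
  set a : Nat := min 20 (su.length + 1) with ha
  rw [pvLoopA_eq, pvScanB_eq su tag "N-term" 0 _ (le_refl 0),
      pvScanB_eq su tag "C-term" _ _ (by omega), List.nil_append, Nat.sub_zero]
  -- split the full range at a
  have hsplit : List.range' 0 (su.length + 1) = List.range' 0 a ++ List.range' a (su.length + 1 - a) := by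
    calc List.range' 0 (su.length + 1) = List.range' 0 (a + (su.length + 1 - a)) := by congr 1; omega
      _ = List.range' 0 a ++ List.range' (0 + 1 * a) (su.length + 1 - a) := by rw [List.range'_append]
      _ = List.range' 0 a ++ List.range' a (su.length + 1 - a) := by rw [show 0 + 1 * a = a by omega]
  rw [hsplit, List.filter_append, List.flatMap_append]
  congr 1
  · -- N-terminal part
    have hc1 : ((List.range' 0 a).filter (fun i : Nat => decide (tag <+: su.drop i))).flatMap
        (pvHandle tI L "both") =
        ((List.range' 0 a).filter (fun i : Nat => decide (tag <+: su.drop i))).map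
          (fun i : Nat => ("N-term", (i : Int), (i : Int) + tI)) := by
      rw [← pvFlatMapSing _ (fun i : Nat => ("N-term", (i : Int), (i : Int) + tI))]
      apply List.flatMap_congr
      intro i hi
      have hmem := List.mem_range'.mp (List.mem_of_mem_filter hi)
      have h20 : (i : Int) < 20 := by omega
      rw [pvHandle_B, if_pos (by simpa using h20)]
    rw [hc1]
    congr 1
    rw [show (min 20 (L - tI + 1) - 0) = min 20 (L - tI + 1) by ring, show Int.toNat 0 = 0 from rfl]
    refine pvFilterTrunc (min 20 (L - tI + 1)).toNat a _ (by omega) ?_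
    intro i h1 h2
    by_cases hP : tag <+: su.drop i
    · exfalso
      have hb := pvBound su tag htag i hP
      omega
    · simp [hP]
  · -- C-terminal part
    have hc2 : ((List.range' a (su.length + 1 - a)).filter (fun i : Nat => decide (tag <+: su.drop i))).flatMap
        (pvHandle tI L "both") =
        (((List.range' a (su.length + 1 - a)).filter (fun i : Nat => decide (tag <+: su.drop i))).filter
          (fun i : Nat => decide ((i : Int) > L - tI - 20))).map
          (fun i : Nat => ("C-term", (i : Int), (i : Int) + tI)) := by
      rw [← pvFlatMapIf]
      apply List.flatMap_congr
      intro i hi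
      have hmem := List.mem_range'.mp (List.mem_of_mem_filter hi)
      have h20 : ¬((i : Int) < 20) := by omega
      rw [pvHandle_B, if_neg (by simpa using h20)]
    rw [hc2, List.filter_filter]
    congr 1
    -- both sides to the full range with the common predicate q2
    have hq2LHS : (List.range' a (su.length + 1 - a)).filter
          (fun i : Nat => decide ((i : Int) > L - tI - 20) && decide (tag <+: su.drop i)) =
        (List.range' a (su.length + 1 - a)).filter
          (fun i : Nat => decide (a ≤ i) && (decide ((i : Int) > L - tI - 20) && decide (tag <+: su.drop i))) := by
      apply List.filter_congr
      intro i hi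
      simp only [List.mem_range'] at hi
      rw [show decide (a ≤ i) = true by simp; omega, Bool.true_and]
    have hq2RHS : (List.range' (max (max 0 (L - tI - 19)) (min 20 (L - tI + 1))).toNat
          ((L - tI + 1 - max (max 0 (L - tI - 19)) (min 20 (L - tI + 1))).toNat)).filter
          (fun i : Nat => decide (tag <+: su.drop i)) =
        (List.range' (max (max 0 (L - tI - 19)) (min 20 (L - tI + 1))).toNat
          ((L - tI + 1 - max (max 0 (L - tI - 19)) (min 20 (L - tI + 1))).toNat)).filter
          (fun i : Nat => decide (a ≤ i) && (decide ((i : Int) > L - tI - 20) && decide (tag <+: su.drop i))) := by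
      apply List.filter_congr
      intro i hi
      simp only [List.mem_range'] at hi
      rw [show decide (a ≤ i) = true by simp; omega, Bool.true_and,
          show decide ((i : Int) > L - tI - 20) = true by simp; omega, Bool.true_and]
    rw [hq2LHS, hq2RHS]
    have hw1 := pvFilterWin a (su.length + 1 - a) (su.length + 1)
      (fun i : Nat => decide (a ≤ i) && (decide ((i : Int) > L - tI - 20) && decide (tag <+: su.drop i)))
      (by omega)
      (fun i hia => by simp; omega)
      (fun i hia => by
        by_cases hP : tag <+: su.drop i
        · exfalso
          have hb := pvBound su tag htag i hP
          omega
        · simp [hP])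
    have hw2 := pvFilterWin ((max (max 0 (L - tI - 19)) (min 20 (L - tI + 1))).toNat)
      ((L - tI + 1 - max (max 0 (L - tI - 19)) (min 20 (L - tI + 1))).toNat) (su.length + 1)
      (fun i : Nat => decide (a ≤ i) && (decide ((i : Int) > L - tI - 20) && decide (tag <+: su.drop i)))
      (by omega)
      (fun i hia => by
        by_cases hP : tag <+: su.drop i
        · have hb := pvBound su tag htag i hP
          have : ¬(a ≤ i) ∨ ¬((i : Int) > L - tI - 20) := by omega
          rcases this with h | h <;> simp [h]
        · simp [hP])
      (fun i hia => by
        by_cases hP : tag <+: su.drop i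
        · exfalso
          have hb := pvBound su tag htag i hP
          omega
        · simp [hP])
    rw [hw1, hw2]

theorem pvLenUpper (l : List Char) : (PySem.Chars.upper l).length = l.length := by
  simp [PySem.Chars.upper]

def pvHits (su : List Char) (L : Int) (tg : String × String × String) : List (String × Int × Int) :=
  let t : Int := (tg.1.toList.length : Int)
  let nHi := min 20 (L - t + 1)
  let cLo := max 0 (L - t - 19)
  if tg.2.2 == "N-term" then pvScanB su tg.1.toList "N-term" 0 nHi
  else if tg.2.2 == "C-term" then pvScanB su tg.1.toList "C-term" cLo (L - t + 1)
  else pvScanB su tg.1.toList "N-term" 0 nHi ++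
       pvScanB su tg.1.toList "C-term" (max cLo nHi) (L - t + 1)

theorem pvHits_eq (tg : String × String × String) (htg : tg ∈ pvKnownTags) (l : List Char) :
    pvTagLoopA (PySem.Chars.upper l) tg.1.toList ((l.length : Nat) : Int) tg.2.2 0 [] =
    pvHits (PySem.Chars.upper l) (l.length : Int) tg := by
  have hlen : ((l.length : Nat) : Int) = ((PySem.Chars.upper l).length : Int) := by
    rw [pvLenUpper]
  rw [hlen, pvHits]
  fin_cases htg
  · rw [if_pos (by decide)]
    exact pvTagN _ _ (by decide)
  · rw [if_neg (by decide), if_neg (by decide)]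
    exact pvTagB _ _ (by decide)
  · rw [if_neg (by decide), if_pos (by decide)]
    exact pvTagC _ _ (by decide)
  · rw [if_neg (by decide), if_pos (by decide)]
    exact pvTagC _ _ (by decide)
  · rw [if_neg (by decide), if_neg (by decide)]
    exact pvTagB _ _ (by decide)
  · rw [if_neg (by decide), if_neg (by decide)]
    exact pvTagB _ _ (by decide)

theorem pvDetect_items (seq : String) :
    (pvDetectA seq).items =
    ((pvKnownTags.filter
        (fun tg => !(pvHits (PySem.Chars.upper seq.toList) (seq.toList.length : Int) tg == []))).map
      (fun tg => (tg.2.1, pvHits (PySem.Chars.upper seq.toList) (seq.toList.length : Int) tg))) := by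
  rw [pvDetectA]
  have h1 : pvKnownTags.foldl (fun found tg =>
        let positions := pvTagLoopA (PySem.Chars.upper seq.toList) tg.1.toList ((seq.toList.length : Nat) : Int) tg.2.2 0 []
        if positions == [] then found else found.insert tg.2.1 positions)
      (PySem.Dict.empty : PySem.Dict String (List (String × Int × Int))) =
      pvKnownTags.foldl (fun found tg =>
        if !(pvHits (PySem.Chars.upper seq.toList) (seq.toList.length : Int) tg == [])
        then found.insert tg.2.1 (pvHits (PySem.Chars.upper seq.toList) (seq.toList.length : Int) tg)
        else found) PySem.Dict.empty := by
    apply PySem.List.foldl_congr_mem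
    intro acc tg htg
    rw [pvHits_eq tg htg]
    generalize (pvHits (PySem.Chars.upper seq.toList) (seq.toList.length : Int) tg) = v
    cases h : (v == []) <;> simp [h]
  rw [h1, PySem.List.foldl_if_eq_foldl_filter]
  rw [PySem.Dict.items_foldl_insert_fresh]
  · rfl
  · intro a ha
    simp [PySem.Dict.contains_empty]
  · have h6 : (pvKnownTags.map (fun tg => tg.2.1)).Nodup := by decide
    exact h6.sublist (List.Sublist.map _ List.filter_sublist)

theorem pvRow_eq (ta : PySem.Dict String (List (String × (List (String × Int × Int)))))
    (row : Bool × String × String) :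
    (pvDetectA row.2.2).items.foldl
      (fun ta p => ta.modify p.1 [] (· ++ [(row.2.1, p.2)])) ta = pvRowB ta row := by
  rw [pvDetect_items, List.foldl_map]
  have hB : pvRowB ta row = pvKnownTags.foldl (fun ta tg =>
      if pvHits (PySem.Chars.upper row.2.2.toList) (row.2.2.toList.length : Int) tg == [] then ta
      else ta.modify tg.2.1 [] (· ++ [(row.2.1, pvHits (PySem.Chars.upper row.2.2.toList) (row.2.2.toList.length : Int) tg)])) ta := rfl
  rw [hB]
  have h2 : pvKnownTags.foldl (fun ta tg =>
      if pvHits (PySem.Chars.upper row.2.2.toList) (row.2.2.toList.length : Int) tg == [] then ta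
      else ta.modify tg.2.1 [] (· ++ [(row.2.1, pvHits (PySem.Chars.upper row.2.2.toList) (row.2.2.toList.length : Int) tg)])) ta =
      pvKnownTags.foldl (fun ta tg =>
      if !(pvHits (PySem.Chars.upper row.2.2.toList) (row.2.2.toList.length : Int) tg == [])
      then ta.modify tg.2.1 [] (· ++ [(row.2.1, pvHits (PySem.Chars.upper row.2.2.toList) (row.2.2.toList.length : Int) tg)])
      else ta) ta := by
    apply PySem.List.foldl_congr_mem
    intro acc tg _
    generalize (pvHits (PySem.Chars.upper row.2.2.toList) (row.2.2.toList.length : Int) tg) = v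
    cases h : (v == [])
    · rw [if_neg (by simp), if_pos (by simp)]
    · rw [if_pos (by simp), if_neg (by simp)]
  rw [h2, PySem.List.foldl_if_eq_foldl_filter]

theorem analyze_main (rows : List (Bool × String × String)) :
    analyze_tags_in_dataset rows = analyze_tags_in_dataset_alt rows := by
  rw [analyze_tags_in_dataset, analyze_tags_in_dataset_alt]
  congr 1
  apply PySem.List.foldl_congr_mem
  intro acc row _
  exact pvRow_eq acc row

-- ===== VERDICT (by name: the statement is the Claim_ definition above) =====
theorem analyze_tags_in_dataset_spec : Claim_equal_analyze_tags_in_dataset := by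
  intro rows _
  unfold Spec_analyze_tags_in_dataset
  exact analyze_main rows
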